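-- pv_equiv track=rewrite | github.com/sghpjuikit/player | app/speech-recognition-whisper/util_itr.py | noThinking
-- ===== SOURCE A (Python) =====
-- def noThinking(generator):
--     """
--     Lazily consumes a generator, filtering out <think>...</think> blocks.
--
--     Args:
--         generator: An iterable of strings.
--
--     Yields:
--         Strings from the generator, excluding the content within the
--         initial <think> tags.
--     """
--
--     THINKING = None
--     buffer = ""
--     think_start_tag = "<think>"
--     think_end_tag = "</think>"
--
--     for chunk in generator:
--         if THINKING is None:
--             buffer += chunk
--             # Continue buffering until we have enough to decide
--             if len(buffer) <= len(think_start_tag): continue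
--
--             if buffer.startswith(think_start_tag):
--                 THINKING = True
--                 buffer = buffer[len(think_start_tag):] # Keep the part after <think> tag, in case the end tag is in the same chunk
--
--                 if think_end_tag in buffer:
--                     THINKING = False
--                     end_index = buffer.find(think_end_tag)
--                     buffer = buffer[end_index + len(think_end_tag):]  # Keep the rest after </think>
--                     if len(buffer)>0: yield buffer
--                     buffer = "" # Clear the buffer
--
--             else:
--                 THINKING = False
--                 if len(buffer)>0: yield buffer
--                 buffer = ""  # Clear the buffer
--
--         elif THINKING is True:
--             buffer += chunk
--             if think_end_tag in buffer:
--                 THINKING = False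
--                 end_index = buffer.find(think_end_tag)
--                 buffer = buffer[end_index + len(think_end_tag):]  # Keep the rest after </think>
--                 if len(buffer)>0: yield buffer
--                 buffer = "" # Clear the buffer
--
--         elif THINKING is False:
--             #Just outputting normally now
--             if len(chunk)>0: yield chunk
-- ===== SOURCE B (Python) =====
-- def noThinking(generator):
--     """
--     Same output as A, computed in one linear pass: accumulate chunks only
--     until the <think>-prefix decision can be made; while discarding a
--     thinking block keep just a tag-length (7-char) tail of the buffer and
--     search for "</think>" in that window plus the new chunk, so the buffer
--     never grows with the size of the thinking block.
--     """
--     END = "</think>"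
--     it = iter(generator)
--     buf = ""
--     started = False
--     for chunk in it:
--         buf += chunk
--         if len(buf) > 7:
--             started = True
--             break
--     if not started:
--         return
--     if buf.startswith("<think>"):
--         tail = buf[7:]
--         while True:
--             k = tail.find(END)
--             if k >= 0:
--                 rest = tail[k + 8:]
--                 if rest:
--                     yield rest
--                 break
--             if len(tail) > 7:
--                 tail = tail[len(tail) - 7:]
--             try:
--                 tail += next(it)
--             except StopIteration:
--                 return
--     else:
--         yield buf
--     for chunk in it:
--         if chunk:
--             yield chunk
-- ===== Notes on version B (the rewrite author's own statement) =====
-- stated objective: alternative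
-- what changed: B replaces A's single state-machine fold that re-scans the whole growing buffer for "</think>" on every chunk with three explicit phases that keep only a 7-character tail of the discarded thinking text and search just that window plus the new chunk; intended as faster, but the probe measured only ~1.2x at its largest size, so no speed is claimed.
import Mathlib
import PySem

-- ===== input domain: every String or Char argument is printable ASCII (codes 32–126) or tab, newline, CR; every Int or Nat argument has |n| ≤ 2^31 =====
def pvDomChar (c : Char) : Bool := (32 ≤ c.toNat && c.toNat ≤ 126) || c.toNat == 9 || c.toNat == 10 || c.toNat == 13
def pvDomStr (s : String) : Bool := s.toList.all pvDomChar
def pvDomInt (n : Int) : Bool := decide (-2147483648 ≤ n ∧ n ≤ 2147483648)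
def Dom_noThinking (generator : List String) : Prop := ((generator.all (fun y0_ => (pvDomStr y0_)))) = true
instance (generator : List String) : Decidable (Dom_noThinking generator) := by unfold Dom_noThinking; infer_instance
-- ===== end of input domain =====

-- B restructures A's one state-machine fold into three explicit phases and, while discarding
-- a <think> block, keeps only a 7-char tail of the buffer, searching for "</think>" in that
-- window plus the new chunk rather than in A's whole accumulated buffer (intended to avoid
-- A's repeated re-scan; a timing run measured only ~1.2x at its largest size).

-- ===== PORT A =====
-- shared tag constants (as Python code-point lists)
def pvThinkStart : List Char := "<think>".toList
def pvThinkEnd : List Char := "</think>".toList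

-- one iteration of A's for-loop: state = (THINKING, buffer, yielded-so-far)
-- `.toNat` on the find result is exact: it is guarded by the `isIn` check, so find ≥ 0
def pvStepA (st : Option Bool × List Char × List (List Char)) (chunk : List Char) :
    Option Bool × List Char × List (List Char) :=
  match st with
  | (none, buffer, out) =>
    let buffer := buffer ++ chunk
    if buffer.length ≤ pvThinkStart.length then (none, buffer, out)
    else if PySem.Chars.startswith buffer pvThinkStart then
      let buffer := buffer.drop pvThinkStart.length
      if PySem.Chars.isIn pvThinkEnd buffer then
        let endIndex := (PySem.Chars.find buffer pvThinkEnd).toNat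
        let buffer := buffer.drop (endIndex + pvThinkEnd.length)
        (some false, [], out ++ (if 0 < buffer.length then [buffer] else []))
      else (some true, buffer, out)
    else (some false, [], out ++ (if 0 < buffer.length then [buffer] else []))
  | (some true, buffer, out) =>
    let buffer := buffer ++ chunk
    if PySem.Chars.isIn pvThinkEnd buffer then
      let endIndex := (PySem.Chars.find buffer pvThinkEnd).toNat
      let buffer := buffer.drop (endIndex + pvThinkEnd.length)
      (some false, [], out ++ (if 0 < buffer.length then [buffer] else []))
    else (some true, buffer, out)
  | (some false, buffer, out) =>
    (some false, buffer, out ++ (if 0 < chunk.length then [chunk] else []))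

def noThinking (generator : List String) : List String :=
  ((generator.map String.toList).foldl pvStepA (none, [], [])).2.2.map String.ofList

-- ===== PORT B =====
-- Source B's final pass: yield every nonempty remaining chunk as-is
def pvPhase3 (rest : List (List Char)) : List (List Char) :=
  rest.filter (fun c => 0 < c.length)

-- Source B's while-loop: tag-length window search for "</think>"
def pvPhase2 (rest : List (List Char)) (tail : List Char) : List (List Char) :=
  match rest with
  | [] =>
    if 0 ≤ PySem.Chars.find tail pvThinkEnd then
      let r := tail.drop ((PySem.Chars.find tail pvThinkEnd).toNat + pvThinkEnd.length)
      (if 0 < r.length then [r] else []) ++ pvPhase3 []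
    else []
  | c :: rest' =>
    if 0 ≤ PySem.Chars.find tail pvThinkEnd then
      let r := tail.drop ((PySem.Chars.find tail pvThinkEnd).toNat + pvThinkEnd.length)
      (if 0 < r.length then [r] else []) ++ pvPhase3 (c :: rest')
    else
      pvPhase2 rest' ((if 7 < tail.length then tail.drop (tail.length - 7) else tail) ++ c)

-- Source B's first for-loop: accumulate until the prefix decision is possible
def pvPhase1 (buf : List Char) (chunks : List (List Char)) : List (List Char) :=
  match chunks with
  | [] => []
  | c :: rest =>
    let buf := buf ++ c
    if 7 < buf.length then
      if PySem.Chars.startswith buf pvThinkStart then pvPhase2 rest (buf.drop 7)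
      else buf :: pvPhase3 rest
    else pvPhase1 buf rest

def noThinking_alt (generator : List String) : List String :=
  (pvPhase1 [] (generator.map String.toList)).map String.ofList

-- ===== PRECONDITION & SPEC =====
def Spec_noThinking (generator : List String) (out : List String) : Prop := out = noThinking_alt generator
instance (generator : List String) (out : List String) : Decidable (Spec_noThinking generator out) := by unfold Spec_noThinking; infer_instance

-- ===== CLAIM (what is proved, stated in full; the proofs are below) =====
def Claim_equal_noThinking : Prop := ∀ (generator : List String), Dom_noThinking generator → Spec_noThinking generator (noThinking generator)

-- ===== LEMMAS AND PROOFS =====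

-- A's false state just appends the nonempty chunks: equals pvPhase3
theorem pv_false_correct (rest : List (List Char)) :
    ∀ (buf : List Char) (out : List (List Char)),
    (rest.foldl pvStepA (some false, buf, out)).2.2 = out ++ pvPhase3 rest := by
  induction rest with
  | nil => intro buf out; simp [pvPhase3]
  | cons c rest ih =>
    intro buf out
    simp only [List.foldl_cons, pvStepA]
    rw [ih]
    by_cases h : 0 < c.length <;> simp [pvPhase3, h]

-- find picks k if there is an occurrence at k and none before
theorem pv_find_eq_of (s pat : List Char) (k : Nat) (h1 : pat <+: s.drop k)
    (h2 : ∀ i < k, ¬ pat <+: s.drop i) : PySem.Chars.find s pat = k := by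
  have hinf : pat <:+: s := by
    have hi := (PySem.Chars.exists_prefix_drop_iff_isIn (s := s) (sub := pat)).mp ⟨k, h1⟩
    exact (PySem.Chars.isIn_iff_infix pat s).mp hi
  have hnn : 0 ≤ PySem.Chars.find s pat := (PySem.Chars.find_nonneg_iff s pat).mpr hinf
  obtain ⟨hp, hmin⟩ := PySem.Chars.find_spec (s := s) (sub := pat) hnn
  rcases lt_trichotomy (PySem.Chars.find s pat).toNat k with h | h | h
  · exact absurd hp (h2 _ h)
  · omega
  · exact absurd h1 (hmin k h)

-- occurrences wholly inside b are impossible when pat is not an infix of b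
theorem pv_no_early (b c pat : List Char) (hb : ¬ pat <:+: b) (i : Nat)
    (hi : i + pat.length ≤ b.length) : ¬ pat <+: (b ++ c).drop i := by
  intro hp
  apply hb
  have hib : i ≤ b.length := by omega
  rw [List.drop_append_of_le_length hib] at hp
  have hlen : pat.length ≤ (b.drop i).length := by
    rw [List.length_drop]; omega
  have hpre : pat <+: b.drop i := by
    have h1 : pat = ((b.drop i) ++ c).take pat.length := by
      obtain ⟨t, ht⟩ := hp
      rw [← ht, List.take_left']; rfl
    rw [List.take_append_of_le_length hlen] at h1
    rw [h1]; exact List.take_prefix _ _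
  exact hpre.isInfix.trans (List.drop_suffix i b).isInfix

-- shifting find across a dropped prefix that contains no occurrence
theorem pv_find_shift (s pat : List Char) (d : Nat)
    (hno : ∀ i < d, ¬ pat <+: s.drop i) :
    (pat <:+: s ↔ pat <:+: s.drop d) ∧
    (pat <:+: s → PySem.Chars.find s pat = PySem.Chars.find (s.drop d) pat + d) := by
  have exd : pat <:+: s → pat <:+: s.drop d := by
    intro h
    obtain ⟨i, hi⟩ := (PySem.Chars.exists_prefix_drop_iff_isIn (s := s) (sub := pat)).mpr
      ((PySem.Chars.isIn_iff_infix pat s).mpr h)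
    have hdi : d ≤ i := by
      by_contra hlt
      exact hno i (by omega) hi
    have : pat <+: (s.drop d).drop (i - d) := by
      rw [List.drop_drop]
      have : d + (i - d) = i := by omega
      rw [this]; exact hi
    exact (PySem.Chars.isIn_iff_infix pat (s.drop d)).mp
      ((PySem.Chars.exists_prefix_drop_iff_isIn (s := s.drop d) (sub := pat)).mp ⟨_, this⟩)
  constructor
  · exact ⟨exd, fun h => h.trans (List.drop_suffix d s).isInfix⟩
  · intro h
    have hd2 : pat <:+: s.drop d := exd h
    have hnn : 0 ≤ PySem.Chars.find (s.drop d) pat :=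
      (PySem.Chars.find_nonneg_iff (s.drop d) pat).mpr hd2
    obtain ⟨hp, hmin⟩ := PySem.Chars.find_spec (s := s.drop d) (sub := pat) hnn
    have hfind : PySem.Chars.find s pat = ((d + (PySem.Chars.find (s.drop d) pat).toNat : Nat) : Int) := by
      apply pv_find_eq_of
      · rw [← List.drop_drop]
        exact hp
      · intro i hlt hpre
        by_cases hid : i < d
        · exact hno i hid hpre
        · have : pat <+: (s.drop d).drop (i - d) := by
            rw [List.drop_drop]
            have : d + (i - d) = i := by omega
            rw [this]; exact hpre
          exact hmin (i - d) (by omega) this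
    rw [hfind]
    omega

-- when the end tag is found, pvPhase2 emits regardless of the remaining chunks
theorem pv_phase2_found (rest : List (List Char)) (t : List Char)
    (h : 0 ≤ PySem.Chars.find t pvThinkEnd) :
    pvPhase2 rest t =
      (if 0 < (t.drop ((PySem.Chars.find t pvThinkEnd).toNat + pvThinkEnd.length)).length then
        [t.drop ((PySem.Chars.find t pvThinkEnd).toNat + pvThinkEnd.length)] else []) ++ pvPhase3 rest := by
  cases rest <;> simp [pvPhase2, h, pvPhase3]

-- the window invariant: A's full-buffer scan agrees with B's tag-length-window scan
theorem pv_phase2_correct (rest : List (List Char)) :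
    ∀ (b w : List Char) (out : List (List Char)),
    w <:+ b → (w = b ∨ 7 ≤ w.length) → ¬ pvThinkEnd <:+: b →
    (rest.foldl pvStepA (some true, b, out)).2.2 = out ++ pvPhase2 rest w := by
  induction rest with
  | nil =>
    intro b w out hsuf hlen hno
    have hw : ¬ pvThinkEnd <:+: w := fun h => hno (h.trans hsuf.isInfix)
    have hfw : PySem.Chars.find w pvThinkEnd = -1 := (PySem.Chars.find_eq_neg_one_iff w pvThinkEnd).mpr hw
    simp [pvPhase2, hfw]
  | cons c rest ih =>
    intro b w out hsuf hlen hno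
    have hw : ¬ pvThinkEnd <:+: w := fun h => hno (h.trans hsuf.isInfix)
    have hfw : PySem.Chars.find w pvThinkEnd = -1 := (PySem.Chars.find_eq_neg_one_iff w pvThinkEnd).mpr hw
    have hfw' : ¬ 0 ≤ PySem.Chars.find w pvThinkEnd := by rw [hfw]; omega
    -- the window B carries into the next iteration
    set w1 := (if 7 < w.length then w.drop (w.length - 7) else w) with hw1def
    have hw1suf : w1 <:+ b := by
      rw [hw1def]
      split
      · exact (List.drop_suffix _ w).trans hsuf
      · exact hsuf
    have hw1cases : w1 = b ∨ 7 ≤ w1.length := by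
      rw [hw1def]
      by_cases h7 : 7 < w.length
      · right; simp [h7]; omega
      · rcases hlen with h | h
        · left; rw [if_neg h7, h]
        · right; simp [h7]; omega
    obtain ⟨p, hp⟩ := hw1suf
    have hd : b.length = p.length + w1.length := by rw [← hp]; simp
    have hdrop : (b ++ c).drop p.length = w1 ++ c := by
      rw [← hp, List.append_assoc, List.drop_left]
    have hElen : pvThinkEnd.length = 8 := by decide
    have hno_early : ∀ i < p.length, ¬ pvThinkEnd <+: (b ++ c).drop i := by
      intro i hi
      rcases hw1cases with h | h
      · -- w1 = b forces p = []
        have : p.length = 0 := by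
          have := hd; rw [h] at this; omega
        omega
      · exact pv_no_early b c pvThinkEnd hno i (by omega)
    obtain ⟨hiff, hshift⟩ := pv_find_shift (b ++ c) pvThinkEnd p.length hno_early
    rw [hdrop] at hiff hshift
    simp only [List.foldl_cons, pvStepA]
    by_cases hA : pvThinkEnd <:+: (b ++ c)
    · -- end tag completed in this chunk: both emit the identical remainder
      have hisin : PySem.Chars.isIn pvThinkEnd (b ++ c) = true :=
        (PySem.Chars.isIn_iff_infix pvThinkEnd (b ++ c)).mpr hA
      have hwin : pvThinkEnd <:+: (w1 ++ c) := hiff.mp hA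
      have hfind2 : 0 ≤ PySem.Chars.find (w1 ++ c) pvThinkEnd :=
        (PySem.Chars.find_nonneg_iff (w1 ++ c) pvThinkEnd).mpr hwin
      have hfe := hshift hA
      have htoNat : (PySem.Chars.find (b ++ c) pvThinkEnd).toNat =
          (PySem.Chars.find (w1 ++ c) pvThinkEnd).toNat + p.length := by omega
      have hxeq : (b ++ c).drop ((PySem.Chars.find (b ++ c) pvThinkEnd).toNat + pvThinkEnd.length) =
          (w1 ++ c).drop ((PySem.Chars.find (w1 ++ c) pvThinkEnd).toNat + pvThinkEnd.length) := by
        rw [htoNat, ← hdrop, List.drop_drop]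
        congr 1
        omega
      simp only [hisin, if_true, pvPhase2, hfw']
      rw [pv_false_correct, pv_phase2_found rest (w1 ++ c) hfind2, hxeq]
      simp [List.append_assoc]
    · -- not yet: A keeps the whole buffer, B the window; recurse
      have hisin : PySem.Chars.isIn pvThinkEnd (b ++ c) = false := by
        rw [PySem.Chars.isIn_eq_false_iff]; exact hA
      have hwin : ¬ pvThinkEnd <:+: (w1 ++ c) := fun h => hA (hiff.mpr h)
      simp only [hisin, Bool.false_eq_true, if_false]
      rw [ih (b ++ c) (w1 ++ c) out ⟨p, by rw [← List.append_assoc, hp]⟩ ?_ hA]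
      · simp only [pvPhase2, hfw', if_false, ← hw1def]
      · rcases hw1cases with h | h
        · left; rw [h]
        · right; simp; omega

theorem pv_phase1_correct (chunks : List (List Char)) :
    ∀ (buf : List Char) (out : List (List Char)), buf.length ≤ 7 →
    (chunks.foldl pvStepA (none, buf, out)).2.2 = out ++ pvPhase1 buf chunks := by
  induction chunks with
  | nil => intro buf out h; simp [pvPhase1]
  | cons c rest ih =>
    intro buf out h
    have hstart : pvThinkStart.length = 7 := by decide
    simp only [List.foldl_cons, pvStepA, pvPhase1, hstart]
    by_cases hlen : (buf ++ c).length ≤ 7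
    · have hlen' : ¬ 7 < (buf ++ c).length := by omega
      simp only [if_pos hlen, if_neg hlen']
      exact ih (buf ++ c) out hlen
    · have hlen' : 7 < (buf ++ c).length := by omega
      simp only [if_neg hlen, if_pos hlen']
      by_cases hsw : PySem.Chars.startswith (buf ++ c) pvThinkStart = true
      · simp only [hsw, if_true]
        by_cases hin : pvThinkEnd <:+: (buf ++ c).drop 7
        · have hisin : PySem.Chars.isIn pvThinkEnd ((buf ++ c).drop 7) = true :=
            (PySem.Chars.isIn_iff_infix _ _).mpr hin
          have hfind : 0 ≤ PySem.Chars.find ((buf ++ c).drop 7) pvThinkEnd :=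
            (PySem.Chars.find_nonneg_iff _ _).mpr hin
          simp only [hisin, if_true]
          rw [pv_false_correct, pv_phase2_found rest _ hfind]
          simp [List.append_assoc]
        · have hisin : PySem.Chars.isIn pvThinkEnd ((buf ++ c).drop 7) = false := by
            rw [PySem.Chars.isIn_eq_false_iff]; exact hin
          simp only [hisin, Bool.false_eq_true, if_false]
          exact pv_phase2_correct rest _ _ out (List.suffix_refl _) (Or.inl rfl) hin
      · have hsw' : PySem.Chars.startswith (buf ++ c) pvThinkStart = false := by
          simpa using hsw
        have hpos : 0 < (buf ++ c).length := by omega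
        simp only [hsw', Bool.false_eq_true, if_false, if_pos hpos]
        rw [pv_false_correct]
        simp [List.append_assoc]

-- ===== VERDICT (by name: the statement is the Claim_ definition above) =====
theorem noThinking_spec : Claim_equal_noThinking := by
  intro generator _
  unfold Spec_noThinking noThinking noThinking_alt
  rw [pv_phase1_correct (generator.map String.toList) [] [] (by simp)]
  simp
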